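-- pv_equiv track=rewrite | github.com/leinkarin/ex1_AI | blokus_problems.py | iterate_diagonals_from_corner
-- ===== SOURCE A (Python) =====
-- def iterate_diagonals_from_corner(board_h, board_w):
--     diagonals = []
--
--     # The first diagonal contains the tiles adjacent to the top-left corner
--     first_diagonal = [(0, 1), (1, 0)]
--     diagonals.append(first_diagonal)
--
--     # Initialize the next diagonal layer
--     layer = 1
--
--     while True:
--         next_diagonal = []
--
--         # Add the tiles that form the next diagonal
--         for i in range(layer + 1):
--             x = i
--             y = layer - i
--
--             # Check if the coordinates are within the bounds of the board
--             if x < board_w and y < board_h: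
--                 next_diagonal.append((x, y))
--
--         if not next_diagonal:
--             break
--
--         diagonals.append(next_diagonal)
--         layer += 1
--
--     return diagonals
-- ===== SOURCE B (Python) =====
-- def iterate_diagonals_from_corner(board_h, board_w):
--     diagonals = [[(0, 1), (1, 0)]]
--     if board_h >= 1 and board_w >= 1:
--         # each diagonal's index window is known in closed form: no per-index bounds test
--         for layer in range(1, board_h + board_w - 1):
--             lo = max(0, layer - board_h + 1)
--             hi = min(layer, board_w - 1)
--             diagonals.append([(i, layer - i) for i in range(lo, hi + 1)])
--     return diagonals
-- ===== Notes on version B (the rewrite author's own statement) =====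
-- stated objective: alternative
-- what changed: Replaces the unbounded while-loop that scans the full range(layer+1) of every diagonal with a bounded for-loop over the known number of diagonals that emits each diagonal's valid index window [max(0,layer-h+1), min(layer,w-1)] directly, with no per-index bounds test and no empty-diagonal termination sentinel.
import Mathlib
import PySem

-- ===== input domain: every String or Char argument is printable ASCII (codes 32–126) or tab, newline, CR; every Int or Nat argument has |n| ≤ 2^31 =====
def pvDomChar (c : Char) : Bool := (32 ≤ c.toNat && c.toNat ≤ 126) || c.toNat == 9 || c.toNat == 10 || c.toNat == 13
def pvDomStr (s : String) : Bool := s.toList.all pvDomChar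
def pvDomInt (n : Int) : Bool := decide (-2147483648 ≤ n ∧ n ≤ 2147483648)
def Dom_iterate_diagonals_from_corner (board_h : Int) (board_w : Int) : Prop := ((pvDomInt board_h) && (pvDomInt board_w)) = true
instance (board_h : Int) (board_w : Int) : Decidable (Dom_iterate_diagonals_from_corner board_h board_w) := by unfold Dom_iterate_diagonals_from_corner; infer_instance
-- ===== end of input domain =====

-- B replaces A's unbounded while-loop that scans the full index range of every diagonal
-- with a bounded for-loop that computes each diagonal's valid index window in closed form.


-- ===== PORT A =====
-- A's inner for-loop: scan i in range(layer+1), keep (i, layer-i) if in bounds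
def pvDiagA (board_h board_w layer : Int) : List (Int × Int) :=
  (PySem.List.pyRange 0 (layer + 1) 1).foldl
    (fun nd i => if i < board_w ∧ layer - i < board_h then nd ++ [(i, layer - i)] else nd) []

-- termination helper cited by pvLoopA's decreasing_by
theorem pvDiagA_ne_nil (board_h board_w layer : Int)
    (hne : pvDiagA board_h board_w layer ≠ []) :
    1 ≤ board_h ∧ 1 ≤ board_w ∧ layer < board_h + board_w - 1 := by
  unfold pvDiagA at hne
  rw [PySem.List.foldl_append_ite] at hne
  simp only [List.nil_append, ne_eq, List.map_eq_nil_iff] at hne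
  obtain ⟨i, hi⟩ := List.exists_mem_of_ne_nil _ hne
  rw [List.mem_filter, PySem.List.mem_pyRange_one] at hi
  simp only [decide_eq_true_eq] at hi
  omega

-- A's while True loop
def pvLoopA (board_h board_w layer : Int) (acc : List (List (Int × Int))) :
    List (List (Int × Int)) :=
  let nd := pvDiagA board_h board_w layer
  if hnd : nd = [] then acc
  else pvLoopA board_h board_w (layer + 1) (acc ++ [nd])
termination_by (board_h + board_w - 1 - layer).toNat
decreasing_by
  have := pvDiagA_ne_nil board_h board_w layer hnd
  omega

def iterate_diagonals_from_corner (board_h : Int) (board_w : Int) : List (List (Int × Int)) :=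
  pvLoopA board_h board_w 1 [[(0, 1), (1, 0)]]

-- ===== PORT B =====
-- B's list comprehension over the closed-form window [lo, hi]
def pvDiagB (board_h board_w layer : Int) : List (Int × Int) :=
  (PySem.List.pyRange (max 0 (layer - board_h + 1)) (min layer (board_w - 1) + 1) 1).map
    (fun i => (i, layer - i))

def iterate_diagonals_from_corner_alt (board_h : Int) (board_w : Int) : List (List (Int × Int)) :=
  if 1 ≤ board_h ∧ 1 ≤ board_w then
    (PySem.List.pyRange 1 (board_h + board_w - 1) 1).foldl
      (fun diagonals layer => diagonals ++ [pvDiagB board_h board_w layer]) [[(0, 1), (1, 0)]]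
  else [[(0, 1), (1, 0)]]

-- ===== PRECONDITION & SPEC =====
def Spec_iterate_diagonals_from_corner (board_h : Int) (board_w : Int) (out : List (List (Int × Int))) : Prop := out = iterate_diagonals_from_corner_alt board_h board_w
instance (board_h : Int) (board_w : Int) (out : List (List (Int × Int))) : Decidable (Spec_iterate_diagonals_from_corner board_h board_w out) := by unfold Spec_iterate_diagonals_from_corner; infer_instance

-- ===== CLAIM (what is proved, stated in full; the proofs are below) =====
def Claim_equal_iterate_diagonals_from_corner : Prop := ∀ (board_h : Int) (board_w : Int), Dom_iterate_diagonals_from_corner board_h board_w → Spec_iterate_diagonals_from_corner board_h board_w (iterate_diagonals_from_corner board_h board_w)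

-- ===== LEMMAS AND PROOFS =====

-- filtering a contiguous window out of a range is the window itself
theorem pv_filter_pyRange (a b lo hi : Int) (ha : a ≤ lo) (hb : hi + 1 ≤ b) :
    (PySem.List.pyRange a b 1).filter (fun i => decide (lo ≤ i ∧ i ≤ hi))
      = PySem.List.pyRange lo (hi + 1) 1 := by
  by_cases hlh : lo ≤ hi + 1
  · rw [PySem.List.pyRange_one_append a lo b ha (by omega),
        PySem.List.pyRange_one_append lo (hi + 1) b hlh hb,
        List.filter_append, List.filter_append]
    rw [List.filter_eq_nil_iff.2, List.filter_eq_self.2, List.filter_eq_nil_iff.2]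
    · simp
    · intro x hx
      rw [PySem.List.mem_pyRange_one] at hx
      simp only [decide_eq_true_eq]; omega
    · intro x hx
      rw [PySem.List.mem_pyRange_one] at hx
      simp only [decide_eq_true_eq]; omega
    · intro x hx
      rw [PySem.List.mem_pyRange_one] at hx
      simp only [decide_eq_true_eq]; omega
  · rw [show PySem.List.pyRange lo (hi + 1) 1 = [] from
          PySem.List.pyRange_one_eq_nil (by omega),
        List.filter_eq_nil_iff]
    intro x hx
    simp only [decide_eq_true_eq]; omega

-- on its valid layers, A's scanned diagonal is B's windowed diagonal
theorem pvDiagA_eq_pvDiagB (board_h board_w layer : Int) (hl : 0 ≤ layer) :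
    pvDiagA board_h board_w layer = pvDiagB board_h board_w layer := by
  unfold pvDiagA pvDiagB
  rw [PySem.List.foldl_append_ite, List.nil_append]
  rw [List.filter_congr (q := fun i =>
        decide (max 0 (layer - board_h + 1) ≤ i ∧ i ≤ min layer (board_w - 1)))
      (by intro x hx
          rw [PySem.List.mem_pyRange_one] at hx
          simp only [decide_eq_decide]
          omega)]
  rw [pv_filter_pyRange 0 (layer + 1) _ _ (by omega) (by omega)]

-- A's loop from any layer ≥ 1 equals B's fold over the remaining layers
theorem pvLoopA_eq (board_h board_w : Int) (h1 : 1 ≤ board_h) (h2 : 1 ≤ board_w) :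
    ∀ (n : Nat) (layer : Int), 1 ≤ layer → (board_h + board_w - 1 - layer).toNat = n →
    ∀ (acc : List (List (Int × Int))),
      pvLoopA board_h board_w layer acc
        = (PySem.List.pyRange layer (board_h + board_w - 1) 1).foldl
            (fun diagonals l => diagonals ++ [pvDiagB board_h board_w l]) acc := by
  intro n
  induction n with
  | zero =>
    intro layer hl hn acc
    have hge : board_h + board_w - 1 ≤ layer := by omega
    rw [pvLoopA]
    have hnil : pvDiagA board_h board_w layer = [] := by
      by_contra hne
      have := pvDiagA_ne_nil board_h board_w layer hne
      omega
    rw [PySem.List.pyRange_one_eq_nil hge]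
    simp [hnil]
  | succ n ih =>
    intro layer hl hn acc
    have hlt : layer < board_h + board_w - 1 := by omega
    have heq := pvDiagA_eq_pvDiagB board_h board_w layer (by omega)
    have hne : pvDiagA board_h board_w layer ≠ [] := by
      rw [heq]
      unfold pvDiagB
      simp only [ne_eq, List.map_eq_nil_iff]
      intro hcon
      have := congrArg List.length hcon
      rw [PySem.List.length_pyRange_one] at this
      simp at this
      omega
    rw [pvLoopA]
    simp only [hne, dite_false]
    rw [ih (layer + 1) (by omega) (by omega), heq,
        PySem.List.pyRange_one_cons hlt, List.foldl_cons]

-- ===== VERDICT (by name: the statement is the Claim_ definition above) =====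
theorem iterate_diagonals_from_corner_spec : Claim_equal_iterate_diagonals_from_corner := by
  intro board_h board_w _
  unfold Spec_iterate_diagonals_from_corner iterate_diagonals_from_corner
    iterate_diagonals_from_corner_alt
  by_cases hc : 1 ≤ board_h ∧ 1 ≤ board_w
  · rw [if_pos hc, pvLoopA_eq board_h board_w hc.1 hc.2 _ 1 le_rfl rfl]
  · rw [if_neg hc, pvLoopA]
    have hnil : pvDiagA board_h board_w 1 = [] := by
      by_contra hne
      have := pvDiagA_ne_nil board_h board_w 1 hne
      omega
    simp [hnil]
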